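-- pv_equiv track=rewrite | github.com/Lob-Corp/Legacy | src/libraries/mutil.py | get_surname_pieces
-- ===== SOURCE A (Python) =====
-- from typing import List, Optional, Callable, Dict, Any, Tuple, TypeVar, Iterable
--
-- def get_surname_pieces(surname: str, saints: List[str] = ["saint", "sainte"]) -> List[str]:
--     """
--     Splits a surname into significant pieces, ignoring saints and short parts.
--     """
--     surname_lower = surname.lower()
--     words = surname_lower.split()
--
--     pieces = []
--     current_piece = []
--     for word in words:
--         if word in saints or len(word) <= 3:
--             current_piece.append(word)
--         else:
--             if current_piece:
--                 pieces.append(" ".join(current_piece))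
--             current_piece = [word]
--
--     if current_piece:
--         pieces.append(" ".join(current_piece))
--
--     return [p for p in pieces if len(p) > 3]
-- ===== SOURCE B (Python) =====
-- def get_surname_pieces(surname: str, saints=["saint", "sainte"]):
--     """Recursive span-based grouping: each group is the head word plus the
--     run of following insignificant words; no mutable accumulator state."""
--     def significant(w):
--         return w not in saints and len(w) > 3
--
--     def groups(ws):
--         if not ws:
--             return []
--         k = 1
--         while k < len(ws) and not significant(ws[k]):
--             k += 1
--         return [" ".join(ws[:k])] + groups(ws[k:])
--
--     words = surname.lower().split()
--     return [p for p in groups(words) if len(p) > 3]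
-- ===== Notes on version B (the rewrite author's own statement) =====
-- stated objective: alternative
-- what changed: Replaces A's stateful fold with (pieces, current_piece) accumulators and a post-loop flush by a stateless recursion that spans each group (head word plus the following run of insignificant words) directly off the word list.
import Mathlib
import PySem

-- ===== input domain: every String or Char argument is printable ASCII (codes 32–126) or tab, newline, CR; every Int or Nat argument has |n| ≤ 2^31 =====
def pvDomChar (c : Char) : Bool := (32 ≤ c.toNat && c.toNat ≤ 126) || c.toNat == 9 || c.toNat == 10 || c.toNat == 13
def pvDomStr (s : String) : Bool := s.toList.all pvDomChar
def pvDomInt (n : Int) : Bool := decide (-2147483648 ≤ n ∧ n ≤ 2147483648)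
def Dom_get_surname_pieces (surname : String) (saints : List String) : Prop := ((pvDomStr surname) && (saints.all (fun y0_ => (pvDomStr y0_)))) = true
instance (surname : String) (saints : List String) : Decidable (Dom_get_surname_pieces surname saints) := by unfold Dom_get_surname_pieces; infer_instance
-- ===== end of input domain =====

-- B replaces A's stateful fold (pieces/current_piece accumulators + final flush) by a
-- stateless recursion that slices each group off the word list; same O(n) cost.

-- ===== PORT A =====
-- A's for-loop: state (pieces, current_piece); insignificant word appended to
-- current_piece, significant word flushes current_piece and starts a new one.
def pvStepA (saints : List String) (st : List String × List String) (word : String) :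
    List String × List String :=
  if saints.contains word || PySem.Str.len word ≤ 3 then
    (st.1, st.2 ++ [word])
  else
    ((if st.2.isEmpty then st.1 else st.1 ++ [PySem.Str.join " " st.2]), [word])

def get_surname_pieces (surname : String) (saints : List String) : List String :=
  let words := PySem.Str.split₀ (PySem.Str.lower surname)
  let st := words.foldl (pvStepA saints) ([], [])
  let pieces := if st.2.isEmpty then st.1 else st.1 ++ [PySem.Str.join " " st.2]
  pieces.filter (fun p => PySem.Str.len p > 3)

-- ===== PORT B =====
def pvSig (saints : List String) (w : String) : Bool :=
  !saints.contains w && PySem.Str.len w > 3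

-- Source B's groups: head word plus the run of following insignificant words, recursively.
def pvGroupsB (saints : List String) : List String → List String
  | [] => []
  | w :: ws =>
      PySem.Str.join " " (w :: ws.takeWhile (fun x => !pvSig saints x)) ::
        pvGroupsB saints (ws.dropWhile (fun x => !pvSig saints x))
termination_by ws => ws.length
decreasing_by
  simpa using Nat.lt_succ_of_le (ws.length_dropWhile_le _)

def get_surname_pieces_alt (surname : String) (saints : List String) : List String :=
  let words := PySem.Str.split₀ (PySem.Str.lower surname)
  (pvGroupsB saints words).filter (fun p => PySem.Str.len p > 3)

-- ===== PRECONDITION & SPEC =====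
def Spec_get_surname_pieces (surname : String) (saints : List String) (out : List String) : Prop := out = get_surname_pieces_alt surname saints
instance (surname : String) (saints : List String) (out : List String) : Decidable (Spec_get_surname_pieces surname saints out) := by unfold Spec_get_surname_pieces; infer_instance

-- ===== CLAIM (what is proved, stated in full; the proofs are below) =====
def Claim_equal_get_surname_pieces : Prop := ∀ (surname : String) (saints : List String), Dom_get_surname_pieces surname saints → Spec_get_surname_pieces surname saints (get_surname_pieces surname saints)

-- ===== LEMMAS AND PROOFS =====

-- flush of the final loop state
def pvFlush (st : List String × List String) : List String :=
  if st.2.isEmpty then st.1 else st.1 ++ [PySem.Str.join " " st.2]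

-- A's loop condition is the negation of B's significance test
theorem pvInsig_eq (saints : List String) (w : String) :
    (saints.contains w || PySem.Str.len w ≤ 3) = !pvSig saints w := by
  simp only [pvSig, Bool.not_and, Bool.not_not]
  congr 1
  rw [← decide_not, decide_eq_decide]
  omega

-- already-emitted pieces pass through the rest of the loop unchanged
theorem pvFoldA_frame (saints : List String) (ws : List String)
    (pieces cur : List String) :
    pvFlush (ws.foldl (pvStepA saints) (pieces, cur)) =
      pieces ++ pvFlush (ws.foldl (pvStepA saints) ([], cur)) := by
  induction ws generalizing pieces cur with
  | nil =>
    simp only [List.foldl_nil, pvFlush]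
    split <;> simp
  | cons w ws ih =>
    simp only [List.foldl_cons, pvStepA]
    split
    · exact ih pieces (cur ++ [w])
    · rcases cur with _ | ⟨c, cs⟩
      · simpa using ih pieces [w]
      · simp only [List.isEmpty_cons, Bool.false_eq_true, if_false, List.nil_append]
        rw [ih (pieces ++ [PySem.Str.join " " (c :: cs)]) [w],
            ih [PySem.Str.join " " (c :: cs)] [w]]
        simp

-- running A's loop with a non-empty current piece = that piece extended by the
-- insignificant run, then B's groups of the remainder
theorem pvFoldA_span (saints : List String) (ws : List String)
    (cur : List String) (hcur : cur ≠ []) :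
    pvFlush (ws.foldl (pvStepA saints) ([], cur)) =
      PySem.Str.join " " (cur ++ ws.takeWhile (fun x => !pvSig saints x)) ::
        pvGroupsB saints (ws.dropWhile (fun x => !pvSig saints x)) := by
  induction ws generalizing cur with
  | nil => simp [pvFlush, pvGroupsB, hcur]
  | cons w ws ih =>
    simp only [List.foldl_cons, pvStepA, pvInsig_eq, List.takeWhile_cons,
      List.dropWhile_cons]
    by_cases hs : pvSig saints w = true
    · simp only [hs, Bool.not_true, Bool.false_eq_true, if_false,
        List.isEmpty_iff, if_neg hcur, List.nil_append]
      rw [pvFoldA_frame, ih [w] (by simp)]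
      simp [pvGroupsB]
    · have hs' : (!pvSig saints w) = true := by simp [hs]
      simp only [hs', if_true]
      rw [ih (cur ++ [w]) (by simp)]
      simp

-- the two grouping strategies agree from the empty start state
theorem pvGroups_eq (saints : List String) (ws : List String) :
    pvFlush (ws.foldl (pvStepA saints) ([], [])) = pvGroupsB saints ws := by
  cases ws with
  | nil => simp [pvFlush, pvGroupsB]
  | cons w ws =>
    have hstep : pvStepA saints ([], []) w = ([], [w]) := by
      by_cases h : (saints.contains w || decide (PySem.Str.len w ≤ 3)) = true <;>
        simp [pvStepA]
    simp only [List.foldl_cons, hstep]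
    rw [pvFoldA_span saints ws [w] (by simp)]
    simp [pvGroupsB]

-- ===== VERDICT (by name: the statement is the Claim_ definition above) =====
theorem get_surname_pieces_spec : Claim_equal_get_surname_pieces := by
  intro surname saints _
  show get_surname_pieces surname saints = get_surname_pieces_alt surname saints
  show List.filter (fun p => decide (PySem.Str.len p > 3))
      (pvFlush ((PySem.Str.split₀ (PySem.Str.lower surname)).foldl (pvStepA saints) ([], []))) =
    get_surname_pieces_alt surname saints
  rw [pvGroups_eq]
  rfl
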